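-- pv_equiv track=rewrite | github.com/Rudigus/general-python | OBI/bola.py | sequenciaPossivel
-- ===== SOURCE A (Python) =====
-- def sequenciaPossivel(bolas):
--     for i in range(len(bolas) - 1):
--         cont = 1
--         for j in range(i + 1, len(bolas)):
--             if(bolas[j] == bolas[i]):
--                 cont = cont + 1
--             if(cont >= 5):
--                 return False
--     return True
-- ===== SOURCE B (Python) =====
-- def sequenciaPossivel(bolas):
--     counts = {}
--     for b in bolas:
--         counts[b] = counts.get(b, 0) + 1
--     return all(c < 5 for c in counts.values())
-- ===== Notes on version B (the rewrite author's own statement) =====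
-- stated objective: faster
-- what changed: Replaces A's nested index loops (for each position, rescan the suffix counting equal elements) with a single pass building a hash-map of counts followed by a check that every count is below 5.
import Mathlib
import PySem

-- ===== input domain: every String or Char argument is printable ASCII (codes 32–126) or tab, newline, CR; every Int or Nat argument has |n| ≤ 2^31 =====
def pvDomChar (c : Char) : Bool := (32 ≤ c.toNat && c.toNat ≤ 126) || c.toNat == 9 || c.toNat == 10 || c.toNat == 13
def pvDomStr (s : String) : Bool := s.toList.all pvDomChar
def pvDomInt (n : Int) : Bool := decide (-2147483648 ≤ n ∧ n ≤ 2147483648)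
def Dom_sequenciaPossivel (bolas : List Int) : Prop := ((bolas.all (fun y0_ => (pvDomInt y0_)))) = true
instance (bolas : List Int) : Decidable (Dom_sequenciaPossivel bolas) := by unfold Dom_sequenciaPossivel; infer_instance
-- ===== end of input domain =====

-- B replaces A's nested quadratic rescans with one counting pass over a dict plus a check of its values (faster).


-- ===== PORT A =====
-- inner 'for j in range(i+1, len(bolas))' loop: cont counter with early 'return False' at cont >= 5
def seqA_inner (bolas : List Int) (bi : Int) : List Int → Int → Bool
  | [], _ => true
  | j :: rest, cont =>
    let cont' := if PySem.List.pyGetD bolas j 0 == bi then cont + 1 else cont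
    if 5 ≤ cont' then false else seqA_inner bolas bi rest cont'

-- outer 'for i in range(len(bolas) - 1)' loop (indices are always in range, so pyGetD is exact)
def seqA_outer (bolas : List Int) : List Int → Bool
  | [] => true
  | i :: rest =>
    if seqA_inner bolas (PySem.List.pyGetD bolas i 0) (PySem.List.pyRange (i + 1) (bolas.length : Int) 1) 1
    then seqA_outer bolas rest
    else false

def sequenciaPossivel (bolas : List Int) : Bool :=
  seqA_outer bolas (PySem.List.pyRange 0 ((bolas.length : Int) - 1) 1)

-- ===== PORT B =====
def sequenciaPossivel_alt (bolas : List Int) : Bool :=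
  let counts : PySem.Dict Int Int :=
    bolas.foldl (fun d b => d.insert b (d.getD b 0 + 1)) PySem.Dict.empty
  counts.values.all (fun c => decide (c < 5))

-- ===== PRECONDITION & SPEC =====
def Spec_sequenciaPossivel (bolas : List Int) (out : Bool) : Prop := out = sequenciaPossivel_alt bolas
instance (bolas : List Int) (out : Bool) : Decidable (Spec_sequenciaPossivel bolas out) := by unfold Spec_sequenciaPossivel; infer_instance

-- ===== CLAIM (what is proved, stated in full; the proofs are below) =====
def Claim_equal_sequenciaPossivel : Prop := ∀ (bolas : List Int), Dom_sequenciaPossivel bolas → Spec_sequenciaPossivel bolas (sequenciaPossivel bolas)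

-- ===== LEMMAS AND PROOFS =====

-- the inner loop returns true iff the counter never reaches 5, i.e. iff the total count stays ≤ 4
theorem seqA_inner_eq_true {bolas : List Int} {bi : Int} :
    ∀ (js : List Int) (cont : Int), cont ≤ 4 →
      (seqA_inner bolas bi js cont = true ↔
        cont + (js.countP (fun j => PySem.List.pyGetD bolas j 0 == bi) : Int) ≤ 4) := by
  intro js
  induction js with
  | nil => intro cont h; simpa [seqA_inner] using h
  | cons j rest ih =>
    intro cont h
    rw [seqA_inner]
    simp only [List.countP_cons]
    by_cases hm : (PySem.List.pyGetD bolas j 0 == bi) = true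
    · by_cases h5 : (5:Int) ≤ cont + 1
      · simp [hm, if_pos h5]
        omega
      · simp only [hm, if_true]
        rw [if_neg h5, ih (cont + 1) (by omega)]
        push_cast
        omega
    · have h5 : ¬ (5:Int) ≤ cont := by omega
      simp only [Bool.not_eq_true] at hm
      simp only [hm, Bool.false_eq_true, if_false, if_neg h5]
      rw [ih cont h]
      simp

theorem seqA_outer_eq_true (bolas : List Int) :
    ∀ (is : List Int), (seqA_outer bolas is = true ↔
      ∀ i ∈ is, seqA_inner bolas (PySem.List.pyGetD bolas i 0)
        (PySem.List.pyRange (i + 1) (bolas.length : Int) 1) 1 = true) := by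
  intro is
  induction is with
  | nil => simp [seqA_outer]
  | cons i rest ih =>
    rw [seqA_outer]
    by_cases hi : seqA_inner bolas (PySem.List.pyGetD bolas i 0)
        (PySem.List.pyRange (i + 1) (bolas.length : Int) 1) 1 = true
    · simp [hi, ih]
    · simp [hi]

-- the suffix count seen by the inner loop is a List.count on a drop
theorem countP_pyRange_eq_count (bolas : List Int) (bi : Int) (a : Int) (ha : 0 ≤ a) :
    ((PySem.List.pyRange a (bolas.length : Int) 1).countP
      (fun j => PySem.List.pyGetD bolas j 0 == bi)) = (bolas.drop a.toNat).count bi := by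
  rw [show (fun j => PySem.List.pyGetD bolas j 0 == bi) =
        ((fun x => x == bi) ∘ (fun j => PySem.List.pyGetD bolas j 0)) from rfl,
      ← List.countP_map, PySem.List.map_pyGetD_pyRange' bolas 0 ha, ← List.count_eq_countP]

-- A = true iff every position's suffix count (including itself) is ≤ 4
theorem seqA_characterization (bolas : List Int) :
    (sequenciaPossivel bolas = true ↔
      ∀ i : Nat, i + 1 < bolas.length → ((bolas.drop i).count bolas[i]!) ≤ 4) := by
  rw [sequenciaPossivel, seqA_outer_eq_true]
  have hconv : ∀ (n : Nat), n < bolas.length →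
      (seqA_inner bolas (PySem.List.pyGetD bolas (n : Int) 0)
        (PySem.List.pyRange ((n : Int) + 1) (bolas.length : Int) 1) 1 = true ↔
        ((bolas.drop n).count bolas[n]!) ≤ 4) := by
    intro n hn
    rw [seqA_inner_eq_true _ 1 (by omega),
        show ((n : Int) + 1) = ((n + 1 : Nat) : Int) by push_cast; ring,
        countP_pyRange_eq_count bolas _ _ (by omega)]
    have hgd : PySem.List.pyGetD bolas ((n : Nat) : Int) 0 = bolas[n]! := by
      rw [PySem.List.pyGetD_natCast, List.getD_eq_getElem bolas 0 hn, getElem!_pos bolas n hn]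
    have htoNat : ((n + 1 : Nat) : Int).toNat = n + 1 := by omega
    rw [hgd, htoNat]
    have hdrop : bolas.drop n = bolas[n]! :: bolas.drop (n + 1) := by
      rw [getElem!_pos bolas n hn]; exact List.drop_eq_getElem_cons hn
    rw [hdrop, List.count_cons_self]
    omega
  constructor
  · intro h i hi
    have hmem : ((i : Nat) : Int) ∈ PySem.List.pyRange 0 ((bolas.length : Int) - 1) 1 := by
      rw [PySem.List.mem_pyRange_one]; omega
    exact (hconv i (by omega)).mp (h _ hmem)
  · intro h i hmem
    rw [PySem.List.mem_pyRange_one] at hmem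
    obtain ⟨n, rfl⟩ : ∃ n : Nat, i = (n : Int) := ⟨i.toNat, by omega⟩
    exact (hconv n (by omega)).mpr (h n (by omega))

-- per-position suffix counts bounded ↔ every element's total count bounded (the last index is
-- trivial: its suffix holds at most one copy)
theorem suffix_counts_iff_total (l : List Int) :
    (∀ i : Nat, i + 1 < l.length → ((l.drop i).count l[i]!) ≤ 4) ↔
      (∀ x ∈ l, l.count x ≤ 4) := by
  have key : ∀ (m : List Int),
      (∀ i : Nat, i < m.length → ((m.drop i).count m[i]!) ≤ 4) ↔
        (∀ x ∈ m, m.count x ≤ 4) := by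
    intro m
    induction m with
    | nil => simp
    | cons a t ih =>
      constructor
      · intro h x hx
        have ha : ((a :: t).count a) ≤ 4 := by
          have h0 := h 0 (by simp)
          rwa [getElem!_pos (a :: t) 0 (by simp), List.drop_zero] at h0
        rcases List.mem_cons.mp hx with rfl | hxt
        · exact ha
        · by_cases hxa : x = a
          · exact hxa ▸ ha
          · have ht : ∀ y ∈ t, t.count y ≤ 4 := by
              rw [← ih]
              intro i hi
              have hs := h (i + 1) (by simpa using Nat.succ_lt_succ hi)
              rwa [List.drop_succ_cons,
                   getElem!_pos (a :: t) (i + 1) (by simpa using Nat.succ_lt_succ hi),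
                   List.getElem_cons_succ, ← getElem!_pos t i hi] at hs
            rw [List.count_cons_of_ne (Ne.symm hxa)]
            exact ht x hxt
      · intro h i hi
        cases i with
        | zero =>
          have h0 := h a List.mem_cons_self
          rwa [getElem!_pos (a :: t) 0 (by simp), List.drop_zero]
        | succ i =>
          have hit : i < t.length := by simpa using hi
          have hmem : t[i]! ∈ t := by
            rw [getElem!_pos t i hit]; exact List.getElem_mem hit
          have hcle : (t.drop i).count t[i]! ≤ t.count t[i]! :=
            List.Sublist.count_le _ (List.drop_sublist i t)
          have htot := h t[i]! (List.mem_cons_of_mem a hmem)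
          have hle : t.count t[i]! ≤ (a :: t).count t[i]! := by
            by_cases hxa : a = t[i]!
            · rw [← hxa, List.count_cons_self]; omega
            · rw [List.count_cons_of_ne hxa]
          have hidx : (a :: t)[i + 1]! = t[i]! := by
            rw [getElem!_pos (a :: t) (i + 1) (by simpa using Nat.succ_lt_succ hit),
                getElem!_pos t i hit, List.getElem_cons_succ]
          rw [List.drop_succ_cons, hidx]
          omega
  constructor
  · intro h
    rw [← key]
    intro i hi
    by_cases hlast : i + 1 < l.length
    · exact h i hlast
    · have hlen : (l.drop i).length = 1 := by rw [List.length_drop]; omega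
      calc (l.drop i).count l[i]! ≤ (l.drop i).length := List.count_le_length
        _ ≤ 4 := by omega
  · intro h i hi
    exact (key l).mpr h i (by omega)

-- B = true iff every element's total count is < 5
theorem seqB_characterization (bolas : List Int) :
    (sequenciaPossivel_alt bolas = true ↔ ∀ x ∈ bolas, ((bolas.count x : Int)) < 5) := by
  rw [sequenciaPossivel_alt]
  simp only [PySem.Dict.foldl_insert_getD_add_one_eq_counter]
  rw [PySem.Dict.values_eq_map_keys _ (PySem.Dict.nodup_keys_counter bolas) 0,
      List.all_eq_true]
  constructor
  · intro h x hx
    have hxs : x ∈ (PySem.Dict.counter bolas).keys := by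
      rw [PySem.Dict.keys_counter]
      exact (PySem.Set.mem_ofList bolas x).mpr hx
    have hv := h _ (List.mem_map_of_mem hxs)
    rwa [PySem.Dict.getD_counter, decide_eq_true_iff] at hv
  · intro h c hc
    rcases List.mem_map.mp hc with ⟨k, hk, rfl⟩
    rw [PySem.Dict.getD_counter, decide_eq_true_iff]
    rw [PySem.Dict.keys_counter] at hk
    exact h k ((PySem.Set.mem_ofList bolas k).mp hk)

-- ===== VERDICT (by name: the statement is the Claim_ definition above) =====
theorem sequenciaPossivel_spec : Claim_equal_sequenciaPossivel := by
  intro bolas _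
  unfold Spec_sequenciaPossivel
  rw [Bool.eq_iff_iff, seqA_characterization, suffix_counts_iff_total, seqB_characterization]
  constructor
  · intro h x hx; have := h x hx; omega
  · intro h x hx; have := h x hx; omega
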